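-- pv_equiv track=rewrite | github.com/pypi-data/pypi-mirror-47 | packages/gradientone/gradientone-1.0.0-py2.py3-none-any.whl/gradientone/data_manipulation/grl.py | get_rise_ends
-- ===== SOURCE A (Python) =====
-- def get_rise_ends(volts):
--     rise_ends = []
--     rise_flag = False
--     for i, v in enumerate(volts):
--         if v < 0:
--             rise_flag = True
--         if rise_flag and v > 0:
--             rise_ends.append(i)
--             rise_flag = False
--     return rise_ends
-- ===== SOURCE B (Python) =====
-- def get_rise_ends(volts):
--     signed = [(i, v) for i, v in enumerate(volts) if v < 0 or v > 0]
--     return [ci for (pi, pv), (ci, cv) in zip(signed, signed[1:]) if pv < 0 and cv > 0]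
-- ===== Notes on version B (the rewrite author's own statement) =====
-- stated objective: alternative
-- what changed: Replaces the single latched-flag scan with a two-phase approach: first build the list of strictly-signed entries with their indices, then scan consecutive pairs of that list and emit the current index on each negative-to-positive pair.
import Mathlib
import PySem

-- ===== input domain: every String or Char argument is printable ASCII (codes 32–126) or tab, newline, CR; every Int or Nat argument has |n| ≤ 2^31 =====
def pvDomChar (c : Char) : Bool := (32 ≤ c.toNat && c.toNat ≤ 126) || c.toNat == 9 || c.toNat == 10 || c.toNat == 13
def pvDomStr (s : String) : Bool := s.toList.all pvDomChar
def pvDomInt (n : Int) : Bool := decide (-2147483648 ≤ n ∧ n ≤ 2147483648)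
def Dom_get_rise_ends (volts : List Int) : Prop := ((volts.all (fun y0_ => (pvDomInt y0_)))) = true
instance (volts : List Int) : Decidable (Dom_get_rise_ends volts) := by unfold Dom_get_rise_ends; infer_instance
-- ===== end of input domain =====

-- B replaces A's single latched-flag scan by a two-phase decomposition (filter the
-- strictly-signed entries, then scan consecutive pairs); same output, same cost (alternative).

-- ===== PORT A =====
-- literal transliteration of A's enumerate loop with the rise_flag latch
def get_rise_ends (volts : List Int) : List Int :=
  ((PySem.List.enumerate volts 0).foldl
    (fun (st : List Int × Bool) p =>
      let flag := if p.2 < 0 then true else st.2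
      if flag = true ∧ p.2 > 0 then (st.1 ++ [p.1], false) else (st.1, flag))
    ([], false)).1

-- ===== PORT B =====
-- literal transliteration of B: build `signed`, then the pair-scan comprehension
def get_rise_ends_alt (volts : List Int) : List Int :=
  let signed := (PySem.List.enumerate volts 0).filter (fun p => decide (p.2 < 0) || decide (p.2 > 0))
  (signed.zip (signed.drop 1)).filterMap
    (fun q => if q.1.2 < 0 ∧ q.2.2 > 0 then some q.2.1 else none)

-- ===== PRECONDITION & SPEC =====
def Spec_get_rise_ends (volts : List Int) (out : List Int) : Prop := out = get_rise_ends_alt volts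
instance (volts : List Int) (out : List Int) : Decidable (Spec_get_rise_ends volts out) := by unfold Spec_get_rise_ends; infer_instance

-- ===== CLAIM (what is proved, stated in full; the proofs are below) =====
def Claim_equal_get_rise_ends : Prop := ∀ (volts : List Int), Dom_get_rise_ends volts → Spec_get_rise_ends volts (get_rise_ends volts)

-- ===== LEMMAS AND PROOFS =====

-- canonical recursive form of A's flag loop
def flagRun (b : Bool) : List (Int × Int) → List Int
  | [] => []
  | (i, v) :: rest =>
      let b' := if v < 0 then true else b
      if b' = true ∧ v > 0 then i :: flagRun false rest else flagRun b' rest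

-- canonical recursive form of B's pair scan, carrying the previous signed entry
def pairRun (prev : Int × Int) : List (Int × Int) → List Int
  | [] => []
  | (i, v) :: rest =>
      (if prev.2 < 0 ∧ v > 0 then [i] else []) ++ pairRun (i, v) rest

theorem foldl_eq_flagRun (l : List (Int × Int)) (acc : List Int) (b : Bool) :
    (l.foldl
      (fun (st : List Int × Bool) p =>
        let flag := if p.2 < 0 then true else st.2
        if flag = true ∧ p.2 > 0 then (st.1 ++ [p.1], false) else (st.1, flag))
      (acc, b)).1 = acc ++ flagRun b l := by
  induction l generalizing acc b with
  | nil => simp [flagRun]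
  | cons hd tl ih =>
      obtain ⟨i, v⟩ := hd
      by_cases h : (if v < 0 then true else b) = true ∧ v > 0
      · simp only [List.foldl_cons, flagRun]
        rw [if_pos h, if_pos h, ih]
        simp
      · simp only [List.foldl_cons, flagRun]
        rw [if_neg h, if_neg h, ih]

theorem zip_filterMap_eq_pairRun (l : List (Int × Int)) (prev : Int × Int) :
    ((prev :: l).zip (((prev :: l)).drop 1)).filterMap
      (fun q => if q.1.2 < 0 ∧ q.2.2 > 0 then some q.2.1 else none)
      = pairRun prev l := by
  induction l generalizing prev with
  | nil => simp [pairRun]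
  | cons hd tl ih =>
      obtain ⟨i, v⟩ := hd
      have h2 := ih (i, v)
      simp only [List.drop_succ_cons, List.drop_zero] at h2 ⊢
      by_cases h : prev.2 < 0 ∧ v > 0
      · simp [h, pairRun, h2]
      · simp [h, pairRun, h2]

-- the flag run over the raw list equals the pair scan over its signed filtration,
-- provided the flag records whether the previous signed entry was negative
theorem flagRun_eq_pairRun (l : List (Int × Int)) (prev : Int × Int) (hprev : prev.2 ≠ 0) :
    flagRun (decide (prev.2 < 0)) l
      = pairRun prev (l.filter (fun p => decide (p.2 < 0) || decide (p.2 > 0))) := by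
  induction l generalizing prev with
  | nil => simp [flagRun, pairRun]
  | cons hd tl ih =>
      obtain ⟨i, v⟩ := hd
      rcases lt_trichotomy v 0 with hv | hv | hv
      · have hv' : ¬ 0 < v := by omega
        have ihv := ih (i, v) (by simpa using hv.ne)
        simp only [show decide ((i, v).2 < 0) = true by simpa using hv] at ihv
        simp [flagRun, pairRun, hv, hv', ihv]
      · subst hv
        simp [flagRun, ih prev hprev]
      · have hnv : ¬ v < 0 := by omega
        have ihv := ih (i, v) (by omega)
        simp only [show decide ((i, v).2 < 0) = false by simp; omega] at ihv
        by_cases hp : prev.2 < 0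
        · simp [flagRun, pairRun, hv, hnv, hp, ihv]
        · simp [flagRun, pairRun, hv, hnv, hp, ihv]

theorem flagRun_false_eq (l : List (Int × Int)) :
    flagRun false l
      = match l.filter (fun p => decide (p.2 < 0) || decide (p.2 > 0)) with
        | [] => []
        | x :: rest => pairRun x rest := by
  induction l with
  | nil => simp [flagRun]
  | cons hd tl ih =>
      obtain ⟨i, v⟩ := hd
      rcases lt_trichotomy v 0 with hv | hv | hv
      · have hv' : ¬ 0 < v := by omega
        have key := flagRun_eq_pairRun tl (i, v) (by simpa using hv.ne)
        simp only [show decide ((i, v).2 < 0) = true by simpa using hv] at key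
        simp [flagRun, hv, hv', key]
      · subst hv
        simpa [flagRun, List.filter_cons] using ih
      · have hnv : ¬ v < 0 := by omega
        have key := flagRun_eq_pairRun tl (i, v) (by omega)
        simp only [show decide ((i, v).2 < 0) = false by simp; omega] at key
        simp [flagRun, hv, hnv, key]

-- ===== VERDICT (by name: the statement is the Claim_ definition above) =====
theorem get_rise_ends_spec : Claim_equal_get_rise_ends := by
  intro volts _
  unfold Spec_get_rise_ends get_rise_ends get_rise_ends_alt
  rw [foldl_eq_flagRun, List.nil_append, flagRun_false_eq]
  cases h : (PySem.List.enumerate volts 0).filter (fun p => decide (p.2 < 0) || decide (p.2 > 0)) with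
  | nil => rfl
  | cons x rest => exact (zip_filterMap_eq_pairRun rest x).symm
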